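-- pv_equiv track=rewrite | github.com/AayushmanKumar/ReinforceGT | Assgn1-Submission-240023/Assgn2_240023_Aashvi.py | bestResponse
-- ===== SOURCE A (Python) =====
-- def bestResponse(payoff_matrix, player, opponent_action):
--     #Initializing empty set to store best responses
--     best_actions = set()
--     #Initializing payoff with negative infinity
--     best_payoff = float('-inf')
--
-- #Player 1 has index 0, player 2 has index 1
--     payoff_index = 0 if player == 1 else 1
--
--     if player == 1:
--         for p1_action in payoff_matrix:
--             #Loops through its own actions
--             if opponent_action in payoff_matrix[p1_action]:
--                 current_payoff = payoff_matrix[p1_action][opponent_action][payoff_index]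
--
--                 if current_payoff > best_payoff:
--                     best_payoff = current_payoff
--                     #Reset best actions set to only have this one
--                     best_actions = {p1_action}
--                 elif current_payoff == best_payoff:
--                     best_actions.add(p1_action)
--
--     elif player == 2:
--         if opponent_action not in payoff_matrix:
--             return set()
-- #Loops through player 1's matrix as that's how matrix is give in standard form
--         for p2_action in payoff_matrix[opponent_action]:
--             current_payoff = payoff_matrix[opponent_action][p2_action][payoff_index]
--
--             if current_payoff > best_payoff:
--                 best_payoff = current_payoff
--                 best_actions = {p2_action}
--             elif current_payoff == best_payoff:
--                 best_actions.add(p2_action)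
--     else:
--         raise ValueError("Player must be 1 or 2.")
--
--     return best_actions
-- ===== SOURCE B (Python) =====
-- def bestResponse(payoff_matrix, player, opponent_action):
--     # Two-pass: collect (action, payoff) candidates, then take max and its ties.
--     if player == 1:
--         pairs = [(a, row[opponent_action][0])
--                  for a, row in payoff_matrix.items()
--                  if opponent_action in row]
--     elif player == 2:
--         if opponent_action not in payoff_matrix:
--             return set()
--         pairs = [(a, pq[1]) for a, pq in payoff_matrix[opponent_action].items()]
--     else:
--         raise ValueError("Player must be 1 or 2.")
--     if not pairs:
--         return set()
--     best = max(p for _, p in pairs)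
--     return {a for a, p in pairs if p == best}
-- ===== Notes on version B (the rewrite author's own statement) =====
-- stated objective: simpler
-- what changed: Replaces A's single-pass reset/extend accumulator with running best payoff by a two-pass scheme: build the (action, payoff) candidate list once, compute the maximum payoff, and collect all actions attaining it.
import Mathlib
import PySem

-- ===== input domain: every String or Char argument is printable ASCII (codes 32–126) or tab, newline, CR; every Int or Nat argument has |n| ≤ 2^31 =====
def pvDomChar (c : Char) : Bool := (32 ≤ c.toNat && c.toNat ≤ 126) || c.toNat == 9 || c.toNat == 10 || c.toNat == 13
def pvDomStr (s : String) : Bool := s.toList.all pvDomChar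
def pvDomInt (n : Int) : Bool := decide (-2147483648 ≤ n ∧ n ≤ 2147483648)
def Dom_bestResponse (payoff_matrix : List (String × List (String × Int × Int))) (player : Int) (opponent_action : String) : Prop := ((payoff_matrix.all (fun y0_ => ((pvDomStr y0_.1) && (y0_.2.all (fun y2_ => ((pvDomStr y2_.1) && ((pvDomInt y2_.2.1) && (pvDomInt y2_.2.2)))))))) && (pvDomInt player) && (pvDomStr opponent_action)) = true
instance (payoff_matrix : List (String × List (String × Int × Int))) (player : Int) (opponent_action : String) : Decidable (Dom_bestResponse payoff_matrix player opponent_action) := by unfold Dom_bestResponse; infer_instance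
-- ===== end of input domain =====

-- B replaces A's single-pass reset/extend best-so-far accumulator by a two-pass
-- "collect candidates, take the max, keep the ties" scheme (objective: simpler).

-- ===== PORT A =====
-- A's loop body: running state (best_actions, best_payoff); best_payoff = none is float('-inf').
def brStepA (st : List String × Option Int) (a : String) (cur : Int) : List String × Option Int :=
  match st.2 with
  | none => ([a], some cur)                      -- current_payoff > -inf: reset
  | some b =>
    if b < cur then ([a], some cur)              -- current_payoff > best_payoff
    else if cur = b then (PySem.Set.add st.1 a, some b)   -- best_actions.add(...)
    else st

def bestResponse (payoff_matrix : List (String × List (String × Int × Int))) (player : Int) (opponent_action : String) : List String :=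
  if player = 1 then
    -- `for k in d:` with lookups `d[k]` visits exactly d.items
    let pm := PySem.Dict.ofList payoff_matrix
    (pm.items.foldl (fun st kv =>
        match (PySem.Dict.ofList kv.2).get? opponent_action with
        | none => st                               -- `opponent_action in payoff_matrix[p1_action]` fails
        | some pq => brStepA st kv.1 pq.1) ([], none)).1
  else if player = 2 then
    let pm := PySem.Dict.ofList payoff_matrix
    match pm.get? opponent_action with
    | none => []                                   -- early `return set()`
    | some row_list =>
      let row := PySem.Dict.ofList row_list
      (row.items.foldl (fun st kv => brStepA st kv.1 kv.2.2) ([], none)).1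
  else []                                          -- ValueError: excluded by Pre_

-- ===== PORT B =====
-- `if not pairs: return set(); best = max(...); return {a for a,p in pairs if p == best}`
def brBest (pairs : List (String × Int)) : List String :=
  match pairs with
  | [] => []
  | x :: rest =>
    let best := rest.foldl (fun m p => max m p.2) x.2
    ((x :: rest).filter (fun p => p.2 = best)).map (·.1)

def bestResponse_alt (payoff_matrix : List (String × List (String × Int × Int))) (player : Int) (opponent_action : String) : List String :=
  if player = 1 then
    brBest ((PySem.Dict.ofList payoff_matrix).items.filterMap (fun kv =>
      ((PySem.Dict.ofList kv.2).get? opponent_action).map (fun pq => (kv.1, pq.1))))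
  else if player = 2 then
    match (PySem.Dict.ofList payoff_matrix).get? opponent_action with
    | none => []
    | some row_list =>
      brBest ((PySem.Dict.ofList row_list).items.map (fun kv => (kv.1, kv.2.2)))
  else []

-- ===== PRECONDITION & SPEC =====
-- Pre_ excludes exactly the inputs where A raises ValueError("Player must be 1 or 2.").
def Pre_bestResponse (payoff_matrix : List (String × List (String × Int × Int))) (player : Int) (opponent_action : String) : Prop :=
  player = 1 ∨ player = 2
instance (payoff_matrix : List (String × List (String × Int × Int))) (player : Int) (opponent_action : String) : Decidable (Pre_bestResponse payoff_matrix player opponent_action) := by unfold Pre_bestResponse; infer_instance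

def pvWitness_bestResponse : (List (String × List (String × Int × Int))) × Int × String :=
  ([("u", [("l", 3, 1), ("r", 2, 2)]), ("d", [("l", 3, 0), ("m", 5, 5)])], 1, "l")

def Spec_bestResponse (payoff_matrix : List (String × List (String × Int × Int))) (player : Int) (opponent_action : String) (out : List String) : Prop := out = bestResponse_alt payoff_matrix player opponent_action
instance (payoff_matrix : List (String × List (String × Int × Int))) (player : Int) (opponent_action : String) (out : List String) : Decidable (Spec_bestResponse payoff_matrix player opponent_action out) := by unfold Spec_bestResponse; infer_instance

-- ===== CLAIM (what is proved, stated in full; the proofs are below) =====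
def Claim_equal_bestResponse : Prop := ∀ (payoff_matrix : List (String × List (String × Int × Int))) (player : Int) (opponent_action : String), Dom_bestResponse payoff_matrix player opponent_action → Pre_bestResponse payoff_matrix player opponent_action → Spec_bestResponse payoff_matrix player opponent_action (bestResponse payoff_matrix player opponent_action)

-- ===== LEMMAS AND PROOFS =====

-- the running max only grows from its initial value
lemma le_foldl_max2 (t : List (String × Int)) (c : Int) : c ≤ t.foldl (fun m p => max m p.2) c := by
  rw [← List.foldl_map (f := Prod.snd) (g := max)]
  exact (PySem.List.le_foldl_max _ c).1

-- Invariant of A's loop from a concrete running state: the final best payoff is the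
-- running max, and the final action set is the ties with it (prefix acc kept iff no improvement).
lemma foldA_from_some (cs : List (String × Int)) (acc : List String) (b : Int)
    (hnd : (cs.map Prod.fst).Nodup) (hacc : ∀ a ∈ acc, a ∉ cs.map Prod.fst) :
    cs.foldl (fun st c => brStepA st c.1 c.2) (acc, some b)
      = ((if cs.foldl (fun m p => max m p.2) b = b then acc else [])
          ++ (cs.filter (fun p => p.2 = cs.foldl (fun m p => max m p.2) b)).map Prod.fst,
         some (cs.foldl (fun m p => max m p.2) b)) := by
  induction cs generalizing acc b with
  | nil => simp
  | cons x t ih =>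
    simp only [List.map_cons, List.nodup_cons] at hnd
    obtain ⟨hx, hndt⟩ := hnd
    have hacct : ∀ a ∈ acc, a ∉ t.map Prod.fst := fun a ha hm => hacc a ha (by simp [hm])
    simp only [List.foldl_cons, List.filter_cons]
    rcases lt_trichotomy b x.2 with h1 | h1 | h1
    · have hs : brStepA (acc, some b) x.1 x.2 = ([x.1], some x.2) := by simp [brStepA, h1]
      rw [hs, ih [x.1] x.2 hndt (by simpa using hx)]
      simp only [max_eq_right h1.le]
      have hle := le_foldl_max2 t x.2
      generalize hM : t.foldl (fun m p => max m p.2) x.2 = M at *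
      have hMb : ¬ (M = b) := by omega
      by_cases hxM : x.2 = M
      · simp [hMb, hxM]
      · have h2 : ¬ M = x.2 := fun h => hxM h.symm
        simp [hMb, hxM, h2]
    · subst h1
      have hs : brStepA (acc, some x.2) x.1 x.2 = (acc ++ [x.1], some x.2) := by
        simp [brStepA, PySem.Set.add_of_not_mem (by
          intro hmem; exact hacc x.1 hmem (by simp))]
      rw [hs, ih (acc ++ [x.1]) x.2 hndt (by
        intro a ha hm
        rcases List.mem_append.1 ha with h | h
        · exact hacct a h hm
        · simp at h; subst h; exact hx hm)]
      simp only [max_self]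
      generalize hMe : t.foldl (fun m p => max m p.2) x.2 = M at *
      by_cases hM : M = x.2
      · simp [hM]
      · have : ¬ (x.2 = M) := fun h => hM h.symm
        simp [hM, this]
    · have hs : brStepA (acc, some b) x.1 x.2 = (acc, some b) := by
        simp [brStepA, not_lt.2 h1.le, h1.ne]
      rw [hs, ih acc b hndt hacct]
      simp only [max_eq_left h1.le]
      have hle := le_foldl_max2 t b
      generalize hMe : t.foldl (fun m p => max m p.2) b = M at *
      have : ¬ (x.2 = M) := by omega
      simp [this]

-- On duplicate-free candidates, A's single pass computes B's max-then-ties result.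
lemma foldA_eq_brBest (cs : List (String × Int)) (hnd : (cs.map Prod.fst).Nodup) :
    (cs.foldl (fun st c => brStepA st c.1 c.2) ([], none)).1 = brBest cs := by
  cases cs with
  | nil => rfl
  | cons x rest =>
    simp only [List.map_cons, List.nodup_cons] at hnd
    have h0 : brStepA ([], none) x.1 x.2 = ([x.1], some x.2) := rfl
    simp only [List.foldl_cons, h0,
      foldA_from_some rest [x.1] x.2 hnd.2 (by simpa using hnd.1), brBest]
    generalize rest.foldl (fun m p => max m p.2) x.2 = M
    simp only [List.filter_cons]
    by_cases hxM : x.2 = M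
    · subst hxM
      simp
    · have : ¬ M = x.2 := fun h => hxM h.symm
      simp [hxM, this]

-- names picked out of a filterMap of pairs form a sublist of the source's names
lemma filterMap_fst_sublist {α : Type} (l : List α) (k : α → String) (g : α → Option (String × Int))
    (h : ∀ a c, g a = some c → c.1 = k a) :
    List.Sublist ((l.filterMap g).map Prod.fst) (l.map k) := by
  induction l with
  | nil => simp
  | cons a t ih =>
    simp only [List.filterMap_cons, List.map_cons]
    cases hg : g a with
    | none => exact ih.cons _
    | some c => simp only [List.map_cons, h a c hg]; exact ih.cons₂ _

-- A's fold with an embedded optional lookup is the pure fold over the filterMap'd candidates.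
lemma foldl_match_filterMap {α γ : Type} (g : α → Option (String × Int)) (l : List α)
    (st : γ) (f : γ → String → Int → γ) :
    l.foldl (fun st a => match g a with | none => st | some c => f st c.1 c.2) st
      = (l.filterMap g).foldl (fun st c => f st c.1 c.2) st := by
  induction l generalizing st with
  | nil => rfl
  | cons a t ih =>
    simp only [List.foldl_cons, List.filterMap_cons]
    cases g a <;> simp [ih]

-- player 1: A's loop over the matrix = brBest of B's candidate list
lemma player1_eq (payoff_matrix : List (String × List (String × Int × Int))) (opponent_action : String) :
    (let pm := PySem.Dict.ofList payoff_matrix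
     (pm.items.foldl (fun st kv =>
        match (PySem.Dict.ofList kv.2).get? opponent_action with
        | none => st
        | some pq => brStepA st kv.1 pq.1) (([] : List String), (none : Option Int))).1)
    = brBest ((PySem.Dict.ofList payoff_matrix).items.filterMap (fun kv =>
      ((PySem.Dict.ofList kv.2).get? opponent_action).map (fun pq => (kv.1, pq.1)))) := by
  set items := (PySem.Dict.ofList payoff_matrix).items with hitems
  set g : (String × List (String × Int × Int)) → Option (String × Int) :=
    fun kv => ((PySem.Dict.ofList kv.2).get? opponent_action).map (fun pq => (kv.1, pq.1)) with hg
  have hbody : (fun (st : List String × Option Int) kv =>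
      match (PySem.Dict.ofList kv.2).get? opponent_action with
      | none => st
      | some pq => brStepA st kv.1 pq.1)
      = (fun st kv => match g kv with | none => st | some c => brStepA st c.1 c.2) := by
    funext st kv
    cases h : (PySem.Dict.ofList kv.2).get? opponent_action <;> simp [hg, h]
  have hk : (items.map (fun p => p.1)).Nodup := by
    have := PySem.Dict.nodup_keys_ofList (ps := payoff_matrix) (κ := String) (ν := List (String × Int × Int))
    simpa [PySem.Dict.keys, hitems] using this
  have hnd : ((items.filterMap g).map Prod.fst).Nodup :=
    hk.sublist (filterMap_fst_sublist items (fun p => p.1) g (by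
      intro a c hc
      simp only [hg, Option.map_eq_some_iff] at hc
      obtain ⟨pq, _, rfl⟩ := hc
      rfl))
  dsimp only
  rw [hbody, foldl_match_filterMap g items ([], none) brStepA]
  exact foldA_eq_brBest _ hnd

-- player 2: A's loop over a row = brBest of B's candidate list
lemma player2_eq (row_list : List (String × Int × Int)) :
    ((PySem.Dict.ofList row_list).items.foldl (fun st kv => brStepA st kv.1 kv.2.2)
        (([] : List String), (none : Option Int))).1
    = brBest ((PySem.Dict.ofList row_list).items.map (fun kv => (kv.1, kv.2.2))) := by
  have hk : (((PySem.Dict.ofList row_list).items.map (fun kv => (kv.1, kv.2.2))).map Prod.fst).Nodup := by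
    have := PySem.Dict.nodup_keys_ofList (ps := row_list) (κ := String) (ν := Int × Int)
    simpa [PySem.Dict.keys, List.map_map, Function.comp] using this
  have := foldA_eq_brBest ((PySem.Dict.ofList row_list).items.map (fun kv => (kv.1, kv.2.2))) hk
  rwa [List.foldl_map] at this

-- ===== VERDICT (by name: the statement is the Claim_ definition above) =====
theorem bestResponse_spec : Claim_equal_bestResponse := by
  intro payoff_matrix player opponent_action _hdom hpre
  unfold Spec_bestResponse bestResponse bestResponse_alt
  rcases hpre with h | h
  · subst h
    exact player1_eq payoff_matrix opponent_action
  · subst h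
    simp only [if_neg (by decide : ¬ ((2:Int) = 1))]
    cases h : (PySem.Dict.ofList payoff_matrix).get? opponent_action with
    | none => rfl
    | some row_list =>
      dsimp only
      exact player2_eq row_list
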